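-- pv_equiv track=rewrite | github.com/Chris-n-Zeal/Projects | ImageProcess.py | sumRGB
-- ===== SOURCE A (Python) =====
-- def sumRGB(pixelList): #return a RGB tuple that contains the sum of all the RGB tuples in pixelList
-- 	sumRed, sumGreen, sumBlue = 0, 0, 0
-- 	red, green, blue = 0, 0, 0
--
-- 	for pixel in pixelList:
-- 		red, green, blue = pixel
-- 		sumRed += red
-- 		sumGreen += green
-- 		sumBlue += blue
--
-- 	sumPixel = sumRed, sumGreen, sumBlue
-- 	return sumPixel
-- ===== SOURCE B (Python) =====
-- def sumRGB(pixelList):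
--     return (sum(r for r, g, b in pixelList),
--             sum(g for r, g, b in pixelList),
--             sum(b for r, g, b in pixelList))
-- ===== Notes on version B (the rewrite author's own statement) =====
-- stated objective: idiomatic
-- what changed: Replaces the single loop accumulating three running totals in one mutable state with three independent per-channel passes, each a sum() over a generator.
import Mathlib
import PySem

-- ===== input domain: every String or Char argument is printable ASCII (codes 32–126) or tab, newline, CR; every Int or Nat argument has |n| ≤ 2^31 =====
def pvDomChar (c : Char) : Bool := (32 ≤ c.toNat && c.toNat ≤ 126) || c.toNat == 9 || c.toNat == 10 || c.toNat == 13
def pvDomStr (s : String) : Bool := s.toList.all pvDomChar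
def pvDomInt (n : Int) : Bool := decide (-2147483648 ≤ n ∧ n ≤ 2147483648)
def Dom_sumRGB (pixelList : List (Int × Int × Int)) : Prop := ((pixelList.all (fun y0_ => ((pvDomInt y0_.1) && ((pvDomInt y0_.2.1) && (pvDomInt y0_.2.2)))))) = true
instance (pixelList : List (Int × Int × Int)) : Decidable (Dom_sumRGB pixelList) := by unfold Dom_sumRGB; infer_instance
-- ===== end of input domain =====

-- B replaces A's single three-accumulator loop with three independent per-channel sums (idiomatic).

-- ===== PORT A =====
-- one fold carrying the triple (sumRed, sumGreen, sumBlue)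
def sumRGB (pixelList : List (Int × Int × Int)) : Int × Int × Int :=
  pixelList.foldl
    (fun s pixel => (s.1 + pixel.1, s.2.1 + pixel.2.1, s.2.2 + pixel.2.2))
    (0, 0, 0)

-- ===== PORT B =====
-- three separate passes, each summing one channel (sum over a generator)
def sumRGB_alt (pixelList : List (Int × Int × Int)) : Int × Int × Int :=
  ((pixelList.map (fun p => p.1)).sum,
   (pixelList.map (fun p => p.2.1)).sum,
   (pixelList.map (fun p => p.2.2)).sum)

-- ===== PRECONDITION & SPEC =====
def Spec_sumRGB (pixelList : List (Int × Int × Int)) (out : Int × Int × Int) : Prop := out = sumRGB_alt pixelList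
instance (pixelList : List (Int × Int × Int)) (out : Int × Int × Int) : Decidable (Spec_sumRGB pixelList out) := by unfold Spec_sumRGB; infer_instance

-- ===== CLAIM (what is proved, stated in full; the proofs are below) =====
def Claim_equal_sumRGB : Prop := ∀ (pixelList : List (Int × Int × Int)), Dom_sumRGB pixelList → Spec_sumRGB pixelList (sumRGB pixelList)

-- ===== LEMMAS AND PROOFS =====
theorem sumRGB_foldl_general (pixelList : List (Int × Int × Int)) (a b c : Int) :
    pixelList.foldl
      (fun s pixel => (s.1 + pixel.1, s.2.1 + pixel.2.1, s.2.2 + pixel.2.2))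
      (a, b, c)
    = (a + (pixelList.map (fun p => p.1)).sum,
       b + (pixelList.map (fun p => p.2.1)).sum,
       c + (pixelList.map (fun p => p.2.2)).sum) := by
  induction pixelList generalizing a b c with
  | nil => simp
  | cons p t ih => simp [List.foldl, ih]; ring_nf; simp

-- ===== VERDICT (by name: the statement is the Claim_ definition above) =====
theorem sumRGB_spec : Claim_equal_sumRGB := by
  intro pixelList _
  unfold Spec_sumRGB sumRGB sumRGB_alt
  simp [sumRGB_foldl_general]
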